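-- pv_equiv track=rewrite | github.com/TheVibeCoder-AI/gamify | gami.py | _prioritize_health_insurance
-- ===== SOURCE A (Python) =====
-- def _prioritize_health_insurance(goals):
--     health_goals = [g for g in goals if 'health' in g.get('category', '').lower()]
--     other_goals = [g for g in goals if 'health' not in g.get('category', '').lower()]
--     if not health_goals:
--         health_goal = {
--             "id": "goal_health",
--             "title": "Get Comprehensive Health Insurance",
--             "description": "Secure health insurance coverage to protect against medical expenses",
--             "priority": "High",
--             "timeline": "Short term",
--             "category": "Health Insurance Coverage",
--             "target_amount": "2000",
--             "difficulty": "Beginner",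
--             "why_important": "Health insurance is essential for financial security"
--         }
--         return [health_goal] + other_goals
--     return health_goals + other_goals
-- ===== SOURCE B (Python) =====
-- def _prioritize_health_insurance(goals):
--     # Single stable sort: health goals (key False) before the rest, each group in original order.
--     ordered = sorted(goals, key=lambda g: 'health' not in g.get('category', '').lower())
--     if any('health' in g.get('category', '').lower() for g in goals):
--         return ordered
--     health_goal = {
--         "id": "goal_health",
--         "title": "Get Comprehensive Health Insurance",
--         "description": "Secure health insurance coverage to protect against medical expenses",
--         "priority": "High",
--         "timeline": "Short term",
--         "category": "Health Insurance Coverage",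
--         "target_amount": "2000",
--         "difficulty": "Beginner",
--         "why_important": "Health insurance is essential for financial security"
--     }
--     return [health_goal] + ordered
-- ===== Notes on version B (the rewrite author's own statement) =====
-- stated objective: idiomatic
-- what changed: Replaces the two filter passes with one stable sort keyed on not-health (health goals sort first, each group keeping original order) plus an any() check for the no-health default case.
import Mathlib
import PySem

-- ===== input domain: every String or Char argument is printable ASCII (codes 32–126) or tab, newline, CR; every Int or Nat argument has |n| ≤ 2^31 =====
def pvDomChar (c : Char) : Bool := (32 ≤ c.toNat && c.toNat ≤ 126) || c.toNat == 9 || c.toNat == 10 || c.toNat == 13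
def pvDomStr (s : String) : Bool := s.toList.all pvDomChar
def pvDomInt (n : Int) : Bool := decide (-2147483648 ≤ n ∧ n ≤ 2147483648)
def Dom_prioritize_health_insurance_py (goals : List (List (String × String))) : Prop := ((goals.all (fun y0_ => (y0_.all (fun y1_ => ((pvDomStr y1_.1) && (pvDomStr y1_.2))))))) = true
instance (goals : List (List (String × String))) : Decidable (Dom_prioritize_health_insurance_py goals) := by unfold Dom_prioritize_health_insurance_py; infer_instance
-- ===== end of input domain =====

-- B replaces A's two filter passes with one stable sort on a not-health key; idiomatic, same cost class.

-- 'health' in g.get('category', '').lower()  (shared by both Pythons verbatim)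
def pvIsHealth (g : List (String × String)) : Bool :=
  PySem.Str.isIn "health" (PySem.Str.lower ((PySem.Dict.mk g).getD "category" ""))

-- the default health_goal dict, in A's (and B's) literal insertion order
def pvDefaultHealthGoal : List (String × String) :=
  [("id", "goal_health"),
   ("title", "Get Comprehensive Health Insurance"),
   ("description", "Secure health insurance coverage to protect against medical expenses"),
   ("priority", "High"),
   ("timeline", "Short term"),
   ("category", "Health Insurance Coverage"),
   ("target_amount", "2000"),
   ("difficulty", "Beginner"),
   ("why_important", "Health insurance is essential for financial security")]

-- ===== PORT A =====
def prioritize_health_insurance_py (goals : List (List (String × String))) : List (List (String × String)) :=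
  let health_goals := goals.filter (fun g => pvIsHealth g)
  let other_goals := goals.filter (fun g => !(pvIsHealth g))
  if health_goals = [] then
    pvDefaultHealthGoal :: other_goals
  else
    health_goals ++ other_goals

-- ===== PORT B =====
-- Python sorts the bool key as the integers 0/1 (False < True); the key is ported as that Nat.
def prioritize_health_insurance_py_alt (goals : List (List (String × String))) : List (List (String × String)) :=
  let ordered := PySem.List.sorted goals (fun g => if pvIsHealth g then (0 : Nat) else 1) false
  if goals.any (fun g => pvIsHealth g) then ordered
  else pvDefaultHealthGoal :: ordered

-- ===== PRECONDITION & SPEC =====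
def Spec_prioritize_health_insurance_py (goals : List (List (String × String))) (out : List (List (String × String))) : Prop := out = prioritize_health_insurance_py_alt goals
instance (goals : List (List (String × String))) (out : List (List (String × String))) : Decidable (Spec_prioritize_health_insurance_py goals out) := by unfold Spec_prioritize_health_insurance_py; infer_instance

-- ===== CLAIM (what is proved, stated in full; the proofs are below) =====
def Claim_equal_prioritize_health_insurance_py : Prop := ∀ (goals : List (List (String × String))), Dom_prioritize_health_insurance_py goals → Spec_prioritize_health_insurance_py goals (prioritize_health_insurance_py goals)

-- ===== LEMMAS AND PROOFS =====

-- the sort key used by port B, over an arbitrary predicate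
def pvKey {α : Type} (p : α → Bool) (a : α) : Nat := if p a then 0 else 1

-- inserting a key-0 element lands right after the key-0 prefix
theorem pv_insert_true {α : Type} (p : α → Bool) (x : α) (hs os : List α)
    (hx : p x = true) (hhs : ∀ y ∈ hs, p y = true) (hos : ∀ y ∈ os, p y = false) :
    PySem.List.insertBy (fun a b => decide (pvKey p a < pvKey p b)) x (hs ++ os) = hs ++ x :: os := by
  induction hs with
  | nil =>
    cases os with
    | nil => simp [PySem.List.insertBy]
    | cons y ys =>
      have hy : p y = false := hos y (by simp)
      simp [PySem.List.insertBy, pvKey, hx, hy]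
  | cons h t ih =>
    have hh : p h = true := hhs h (by simp)
    have ht : PySem.List.insertBy (fun a b => decide (pvKey p a < pvKey p b)) x (t ++ os) = t ++ x :: os :=
      ih (fun y hy => hhs y (by simp [hy]))
    simp only [pvKey] at ht
    simp [PySem.List.insertBy, pvKey, hx, hh, ht]

-- inserting a key-1 element goes to the very end
theorem pv_insert_false {α : Type} (p : α → Bool) (x : α) (l : List α) (hx : p x = false) :
    PySem.List.insertBy (fun a b => decide (pvKey p a < pvKey p b)) x l = l ++ [x] := by
  apply PySem.List.insertBy_of_forall_not_before
  intro y _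
  simp [pvKey, hx]
  split <;> omega

-- loop invariant of the insertion-sort fold: partition prefix stays partitioned
theorem pv_fold_partition {α : Type} (p : α → Bool) (xs : List α) :
    ∀ hs os : List α, (∀ y ∈ hs, p y = true) → (∀ y ∈ os, p y = false) →
    xs.foldl (fun acc x => PySem.List.insertBy (fun a b => decide (pvKey p a < pvKey p b)) x acc) (hs ++ os)
      = (hs ++ xs.filter p) ++ (os ++ xs.filter (fun y => !(p y))) := by
  induction xs with
  | nil => intro hs os _ _; simp
  | cons x xs ih =>
    intro hs os hhs hos
    by_cases hx : p x = true
    · have hins := pv_insert_true p x hs os hx hhs hos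
      have hassoc : hs ++ x :: os = (hs ++ [x]) ++ os := by simp
      have hhs' : ∀ y ∈ hs ++ [x], p y = true := by
        intro y hy
        rcases List.mem_append.1 hy with h | h
        · exact hhs y h
        · simp at h; simpa [h] using hx
      rw [List.foldl_cons, hins, hassoc, ih (hs ++ [x]) os hhs' hos]
      simp [List.filter_cons, hx]
    · have hx' : p x = false := by simpa using hx
      have hins := pv_insert_false p x (hs ++ os) hx'
      have hassoc : (hs ++ os) ++ [x] = hs ++ (os ++ [x]) := by simp
      have hos' : ∀ y ∈ os ++ [x], p y = false := by
        intro y hy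
        rcases List.mem_append.1 hy with h | h
        · exact hos y h
        · simp at h; simpa [h] using hx'
      rw [List.foldl_cons, hins, hassoc, ih hs (os ++ [x]) hhs hos']
      simp [List.filter_cons, hx']

-- the stable sort on the 0/1 key IS the partition
theorem pv_sorted_partition {α : Type} (p : α → Bool) (xs : List α) :
    PySem.List.sorted xs (pvKey p) false = xs.filter p ++ xs.filter (fun y => !(p y)) := by
  rw [PySem.List.sorted_eq_foldl_insertBy]
  simpa using pv_fold_partition p xs [] [] (by simp) (by simp)

-- ===== VERDICT (by name: the statement is the Claim_ definition above) =====
theorem prioritize_health_insurance_py_spec : Claim_equal_prioritize_health_insurance_py := by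
  intro goals _
  unfold Spec_prioritize_health_insurance_py prioritize_health_insurance_py prioritize_health_insurance_py_alt
  have hsort : PySem.List.sorted goals (fun g => if pvIsHealth g then (0 : Nat) else 1) false
      = goals.filter (fun g => pvIsHealth g) ++ goals.filter (fun y => !(pvIsHealth y)) := by
    simpa [pvKey] using pv_sorted_partition pvIsHealth goals
  by_cases hany : goals.any (fun g => pvIsHealth g) = true
  · have hne : goals.filter (fun g => pvIsHealth g) ≠ [] := by
      rcases List.any_eq_true.1 hany with ⟨x, hx, hpx⟩
      intro hnil
      have : x ∈ goals.filter (fun g => pvIsHealth g) := List.mem_filter.2 ⟨hx, hpx⟩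
      simp [hnil] at this
    simp [hne, hany, hsort]
  · have hnil : goals.filter (fun g => pvIsHealth g) = [] := by
      apply List.filter_eq_nil_iff.2
      intro x hx
      by_contra h
      exact hany (List.any_eq_true.2 ⟨x, hx, by simpa using h⟩)
    simp [hnil, hany, hsort]
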